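-- pv_equiv track=rewrite | github.com/deepika087/CompetitiveProgramming | GeneralPractice/Temp.py | socool
-- ===== SOURCE A (Python) =====
-- def socool(tasks, coolTime):
--   cooldown = {}
--   time = 0
--   for task in tasks:
--     if task not in cooldown:
--       cooldown[task] = coolTime  #A -> 2
--       for key in cooldown.keys(): #A -> 0, B -> 0
--         if cooldown[key] > 0:
--           cooldown[key] -= 1
--       time += 1
--     else:
--       while cooldown[task] > 0:
--         for key in cooldown.keys(): #A -> 0, B -> 0
--           if cooldown[key] > 0:
--             cooldown[key] -= 1
--         time += 1
--       time += 1
--   time += 1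
--   return time
-- ===== SOURCE B (Python) =====
-- def socool(tasks, coolTime):
--     # O(n): record the tick count at which each task's cooldown was started;
--     # remaining cooldown is arithmetic, time advances in one jump.
--     set_tick = {}
--     ticks = 0        # number of decrement rounds A would have performed
--     extra = 0        # the +1 after each repeated task (no decrement round)
--     for task in tasks:
--         if task not in set_tick:
--             set_tick[task] = ticks
--             ticks += 1
--         else:
--             wait = coolTime - (ticks - set_tick[task])
--             if wait > 0:
--                 ticks += wait
--             extra += 1
--     return ticks + extra + 1
-- ===== Notes on version B (the rewrite author's own statement) =====
-- stated objective: faster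
-- what changed: B replaces A's stepwise simulation (decrementing every tracked task's cooldown once per time unit) by recording the tick at which each task's cooldown started and computing the remaining wait and the time jump arithmetically in O(1) per task.
import Mathlib
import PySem

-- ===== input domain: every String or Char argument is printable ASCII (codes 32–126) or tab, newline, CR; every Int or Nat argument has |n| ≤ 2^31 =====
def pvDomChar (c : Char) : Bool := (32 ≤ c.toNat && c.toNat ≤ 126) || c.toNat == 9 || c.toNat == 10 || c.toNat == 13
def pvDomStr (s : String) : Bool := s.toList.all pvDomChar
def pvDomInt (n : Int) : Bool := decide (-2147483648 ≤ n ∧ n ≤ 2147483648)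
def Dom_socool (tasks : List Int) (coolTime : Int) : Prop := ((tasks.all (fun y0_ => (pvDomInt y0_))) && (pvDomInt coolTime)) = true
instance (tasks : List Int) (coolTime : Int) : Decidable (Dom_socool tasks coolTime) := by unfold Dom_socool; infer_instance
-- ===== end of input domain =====

-- B is an O(n) re-implementation: it records the tick at which each task's cooldown started and
-- advances time arithmetically instead of A's stepwise decrement loops; return values are equal.

-- ===== PORT A =====
-- inner loop 'for key in cooldown.keys(): if cooldown[key] > 0: cooldown[key] -= 1'
def tickStep (acc : PySem.Dict Int Int) (k : Int) : PySem.Dict Int Int :=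
  if acc.getD k 0 > 0 then acc.modify k 0 (fun v => v - 1) else acc

def tickAll (d : PySem.Dict Int Int) : PySem.Dict Int Int :=
  (PySem.Dict.keys d).foldl tickStep d

-- 'while cooldown[task] > 0: …' — fuel is the loop counter, exactly cooldown[task] when positive
def whileA (fuel : Nat) (task : Int) (cd : PySem.Dict Int Int) (time : Int) :
    PySem.Dict Int Int × Int :=
  match fuel with
  | 0 => (cd, time)
  | Nat.succ f =>
    if cd.getD task 0 > 0 then whileA f task (tickAll cd) (time + 1) else (cd, time)

def stepA (coolTime : Int) (st : PySem.Dict Int Int × Int) (task : Int) :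
    PySem.Dict Int Int × Int :=
  if st.1.contains task = false then
    (tickAll (st.1.insert task coolTime), st.2 + 1)
  else
    let r := whileA (st.1.getD task 0).toNat task st.1 st.2
    (r.1, r.2 + 1)

def socool (tasks : List Int) (coolTime : Int) : Int :=
  (tasks.foldl (stepA coolTime) ((PySem.Dict.empty : PySem.Dict Int Int), (0 : Int))).2 + 1

-- ===== PORT B =====
-- state: (set_tick, ticks, extra)
def stepB (coolTime : Int) (st : PySem.Dict Int Int × Int × Int) (task : Int) :
    PySem.Dict Int Int × Int × Int :=
  if st.1.contains task = false then
    (st.1.insert task st.2.1, st.2.1 + 1, st.2.2)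
  else
    let wait := coolTime - (st.2.1 - st.1.getD task 0)
    (st.1, (if wait > 0 then st.2.1 + wait else st.2.1), st.2.2 + 1)

def socool_alt (tasks : List Int) (coolTime : Int) : Int :=
  let r := tasks.foldl (stepB coolTime) ((PySem.Dict.empty : PySem.Dict Int Int), (0 : Int), (0 : Int))
  r.2.1 + r.2.2 + 1

-- ===== PRECONDITION & SPEC =====
def Spec_socool (tasks : List Int) (coolTime : Int) (out : Int) : Prop := out = socool_alt tasks coolTime
instance (tasks : List Int) (coolTime : Int) (out : Int) : Decidable (Spec_socool tasks coolTime out) := by unfold Spec_socool; infer_instance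

-- ===== CLAIM (what is proved, stated in full; the proofs are below) =====
def Claim_equal_socool : Prop := ∀ (tasks : List Int) (coolTime : Int), Dom_socool tasks coolTime → Spec_socool tasks coolTime (socool tasks coolTime)

-- ===== LEMMAS AND PROOFS =====

-- A's cooldown value of a task whose cooldown was started at tick s, seen at tick t (s ≤ t)
def cdval (c t s : Int) : Int := max (min c 0) (c - (t - s))

def mapped (c t : Int) (l : List (Int × Int)) : List (Int × Int) :=
  l.map (fun p => (p.1, cdval c t p.2))

def dec1 (p : Int × Int) : Int × Int := (p.1, if p.2 > 0 then p.2 - 1 else p.2)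

lemma map_if_eq_self (l : List (Int × Int)) (k : Int) (h : ∀ p ∈ l, p.1 ≠ k) (x : Int × Int) :
    l.map (fun p => if p.1 == k then x else p) = l := by
  induction l with
  | nil => rfl
  | cons p t ih =>
    have hp := h p (by simp)
    simp only [List.map_cons]
    rw [if_neg (by simpa using hp), ih (fun q hq => h q (by simp [hq]))]

lemma tick_go (post pre : List (Int × Int))
    (h : ((pre ++ post).map Prod.fst).Nodup) :
    (post.map Prod.fst).foldl tickStep (PySem.Dict.mk (pre ++ post))
      = PySem.Dict.mk (pre ++ post.map dec1) := by
  induction post generalizing pre with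
  | nil => simp
  | cons p rest ih =>
    obtain ⟨k, v⟩ := p
    have hnd : ((pre ++ (k, v) :: rest).map Prod.fst).Nodup := h
    have hmem : (k, v) ∈ (PySem.Dict.mk (pre ++ (k, v) :: rest)).items := by simp
    have hkeys : (PySem.Dict.mk (pre ++ (k, v) :: rest)).keys.Nodup := by
      simpa [PySem.Dict.keys] using hnd
    have hget : (PySem.Dict.mk (pre ++ (k, v) :: rest)).getD k 0 = v :=
      PySem.Dict.getD_of_mem_items _ hmem hkeys 0
    have hpre : ∀ q ∈ pre, q.1 ≠ k := by
      intro q hq hqe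
      have hk : k ∈ pre.map Prod.fst := List.mem_map.mpr ⟨q, hq, hqe⟩
      have hdisj := (List.nodup_append.mp (by simpa [List.map_append] using hnd)).2.2
      exact hdisj k hk k (by simp) rfl
    have hrest : ∀ q ∈ rest, q.1 ≠ k := by
      intro q hq hqe
      have h2 : (((k, v) :: rest).map Prod.fst).Nodup :=
        (List.nodup_append.mp (by simpa [List.map_append] using hnd)).2.1
      simp only [List.map_cons, List.nodup_cons] at h2
      exact h2.1 (by exact List.mem_map.mpr ⟨q, hq, hqe⟩)
    simp only [List.map_cons, List.foldl_cons]
    by_cases hv : v > 0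
    · have hstep : tickStep (PySem.Dict.mk (pre ++ (k, v) :: rest)) k
          = PySem.Dict.mk ((pre ++ [(k, v - 1)]) ++ rest) := by
        unfold tickStep
        rw [hget, if_pos hv]
        have hmod : (PySem.Dict.mk (pre ++ (k, v) :: rest)).modify k 0 (fun v => v - 1)
            = (PySem.Dict.mk (pre ++ (k, v) :: rest)).insert k (v - 1) := by
          show (PySem.Dict.mk (pre ++ (k, v) :: rest)).insert k
              ((fun v => v - 1) ((PySem.Dict.mk (pre ++ (k, v) :: rest)).getD k 0)) = _
          rw [hget]
        rw [hmod]
        have hcont : (PySem.Dict.mk (pre ++ (k, v) :: rest)).contains k := by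
          rw [PySem.Dict.contains_iff_mem_keys]
          simp [PySem.Dict.keys]
        apply PySem.Dict.ext
        rw [PySem.Dict.items_insert_of_contains _ _ hcont]
        show (pre ++ (k, v) :: rest).map (fun p => if p.1 == k then (k, v - 1) else p) = _
        rw [List.map_append, List.map_cons]
        rw [map_if_eq_self pre k hpre, map_if_eq_self rest k hrest]
        simp
      rw [hstep]
      have := ih (pre ++ [(k, v - 1)]) (by
        simpa [List.map_append, List.append_assoc] using hnd)
      rw [this]
      simp [dec1, hv, List.append_assoc]
    · have hstep : tickStep (PySem.Dict.mk (pre ++ (k, v) :: rest)) k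
          = PySem.Dict.mk ((pre ++ [(k, v)]) ++ rest) := by
        unfold tickStep
        rw [hget, if_neg hv]
        simp
      rw [hstep]
      have := ih (pre ++ [(k, v)]) (by
        simpa [List.map_append, List.append_assoc] using hnd)
      rw [this]
      simp [dec1, hv, List.append_assoc]

lemma keys_mapped (c t : Int) (l : List (Int × Int)) :
    (mapped c t l).map Prod.fst = l.map Prod.fst := by
  simp [mapped, List.map_map, Function.comp]

lemma dec1_cdval (c t s : Int) (hs : s ≤ t) : dec1 (k, cdval c t s) = (k, cdval c (t + 1) s) := by
  simp only [dec1, cdval, Prod.mk.injEq, true_and]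
  omega

lemma tickAll_mapped (c t : Int) (l : List (Int × Int))
    (hnd : (l.map Prod.fst).Nodup) (hb : ∀ p ∈ l, p.2 ≤ t) :
    tickAll (PySem.Dict.mk (mapped c t l)) = PySem.Dict.mk (mapped c (t + 1) l) := by
  unfold tickAll
  have hkeys : (PySem.Dict.mk (mapped c t l)).keys = (mapped c t l).map Prod.fst := rfl
  rw [hkeys]
  have := tick_go (mapped c t l) [] (by simpa using (keys_mapped c t l ▸ hnd))
  simp only [List.nil_append] at this
  rw [this]
  congr 1
  unfold mapped
  rw [List.map_map]
  apply List.map_congr_left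
  intro p hp
  have := hb p hp
  simp only [Function.comp]
  exact dec1_cdval c t p.2 this

lemma getD_mapped (c t task s : Int) (l : List (Int × Int))
    (hnd : (l.map Prod.fst).Nodup) (hmem : (task, s) ∈ l) :
    (PySem.Dict.mk (mapped c t l)).getD task 0 = cdval c t s := by
  apply PySem.Dict.getD_of_mem_items _ (v := cdval c t s)
  · show (task, cdval c t s) ∈ mapped c t l
    exact List.mem_map.mpr ⟨(task, s), hmem, rfl⟩
  · show ((mapped c t l).map Prod.fst).Nodup
    rw [keys_mapped]; exact hnd

lemma whileA_spec (c : Int) (l : List (Int × Int)) (task s : Int)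
    (hnd : (l.map Prod.fst).Nodup) (hmem : (task, s) ∈ l) :
    ∀ (n : Nat) (t time : Int), (∀ p ∈ l, p.2 ≤ t) → (cdval c t s).toNat = n →
    whileA n task (PySem.Dict.mk (mapped c t l)) time
      = (PySem.Dict.mk (mapped c (t + n) l), time + n) := by
  intro n
  induction n with
  | zero => intro t time _ _; simp [whileA]
  | succ m ih =>
    intro t time hb hn
    have hpos : cdval c t s = m + 1 := by omega
    unfold whileA
    rw [getD_mapped c t task s l hnd hmem, if_pos (by omega)]
    rw [tickAll_mapped c t l hnd hb]
    have hnext : (cdval c (t + 1) s).toNat = m := by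
      have h1 : cdval c t s = max (min c 0) (c - (t - s)) := rfl
      have h2 : cdval c (t + 1) s = max (min c 0) (c - (t + 1 - s)) := rfl
      omega
    rw [ih (t + 1) (time + 1) (fun p hp => by have := hb p hp; omega) hnext]
    have h1 : t + 1 + (m : Int) = t + ((m + 1 : Nat) : Int) := by push_cast; ring
    have h2 : time + 1 + (m : Int) = time + ((m + 1 : Nat) : Int) := by push_cast; ring
    rw [h1, h2]

lemma cdval_self (c t : Int) : cdval c t t = c := by
  simp only [cdval]; omega

lemma nodup_snoc (l : List (Int × Int)) (task t : Int)
    (hnd : (l.map Prod.fst).Nodup) (hnm : task ∉ l.map Prod.fst) :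
    ((l ++ [(task, t)]).map Prod.fst).Nodup := by
  rw [List.map_append, List.nodup_append]
  refine ⟨hnd, by simp, ?_⟩
  intro a ha b hb
  simp only [List.map_cons, List.map_nil, List.mem_cons, List.not_mem_nil, or_false] at hb
  subst hb
  intro hab
  exact hnm (hab ▸ ha)

lemma loop_inv (c : Int) (tasks : List Int) :
    ∀ (l : List (Int × Int)) (t e : Int),
    (l.map Prod.fst).Nodup → (∀ p ∈ l, p.2 ≤ t) →
    tasks.foldl (stepA c) (PySem.Dict.mk (mapped c t l), t + e)
      = (let r := tasks.foldl (stepB c) (PySem.Dict.mk l, t, e);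
         (PySem.Dict.mk (mapped c r.2.1 r.1.items), r.2.1 + r.2.2)) := by
  induction tasks with
  | nil => intro l t e hnd hb; simp
  | cons task rest ih =>
    intro l t e hnd hb
    simp only [List.foldl_cons]
    have hcont : (PySem.Dict.mk (mapped c t l)).contains task
        = (PySem.Dict.mk l).contains task := by
      rw [PySem.Dict.contains_eq_decide_mem_keys, PySem.Dict.contains_eq_decide_mem_keys]
      show decide (task ∈ (mapped c t l).map Prod.fst) = decide (task ∈ l.map Prod.fst)
      rw [keys_mapped]
    by_cases hc : (PySem.Dict.mk l).contains task = false
    · -- new task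
      have hstepA : stepA c (PySem.Dict.mk (mapped c t l), t + e) task
          = (PySem.Dict.mk (mapped c (t + 1) (l ++ [(task, t)])), t + e + 1) := by
        unfold stepA
        have hc2 : (PySem.Dict.mk (mapped c t l)).contains task = false := by rw [hcont]; exact hc
        rw [if_pos (show (PySem.Dict.mk (mapped c t l), t + e).1.contains task = false from hc2)]
        have hins : (PySem.Dict.mk (mapped c t l)).insert task c
            = PySem.Dict.mk (mapped c t (l ++ [(task, t)])) := by
          apply PySem.Dict.ext
          rw [PySem.Dict.items_insert_of_not_contains _ _ hc2]
          show mapped c t l ++ [(task, c)] = mapped c t (l ++ [(task, t)])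
          unfold mapped
          rw [List.map_append]
          simp [cdval_self]
        rw [hins]
        have hnd' : ((l ++ [(task, t)]).map Prod.fst).Nodup := by
          refine nodup_snoc l task t hnd ?_
          intro ha
          have : (PySem.Dict.mk l).contains task = true := by
            rw [PySem.Dict.contains_eq_decide_mem_keys]
            simpa [PySem.Dict.keys] using ha
          rw [hc] at this; exact absurd this (by simp)
        rw [tickAll_mapped c t (l ++ [(task, t)]) hnd'
          (by intro p hp; rcases List.mem_append.mp hp with h | h
              · exact hb p h
              · rw [List.mem_singleton] at h; subst h; exact le_refl t)]
      rw [hstepA]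
      have hstepB : stepB c (PySem.Dict.mk l, t, e) task
          = (PySem.Dict.mk (l ++ [(task, t)]), t + 1, e) := by
        unfold stepB
        rw [if_pos (show (PySem.Dict.mk l, t, e).1.contains task = false from hc)]
        congr 1
        apply PySem.Dict.ext
        exact PySem.Dict.items_insert_of_not_contains _ _ hc
      rw [hstepB]
      have hnd' : ((l ++ [(task, t)]).map Prod.fst).Nodup := by
        refine nodup_snoc l task t hnd ?_
        intro ha
        have : (PySem.Dict.mk l).contains task = true := by
          rw [PySem.Dict.contains_eq_decide_mem_keys]
          simpa [PySem.Dict.keys] using ha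
        rw [hc] at this; exact absurd this (by simp)
      have := ih (l ++ [(task, t)]) (t + 1) e hnd'
        (by intro p hp; rcases List.mem_append.mp hp with h | h
            · have := hb p h; omega
            · rw [List.mem_singleton] at h; subst h; simp)
      rw [show t + e + 1 = (t + 1) + e by ring]
      exact this
    · -- seen task
      have hc' : (PySem.Dict.mk l).contains task = true := by
        cases h : (PySem.Dict.mk l).contains task
        · exact absurd h hc
        · rfl
      have hmemk : task ∈ l.map Prod.fst := by
        have := hc'
        rw [PySem.Dict.contains_eq_decide_mem_keys] at this
        exact of_decide_eq_true (by exact this)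
      obtain ⟨p, hpmem0, hpk⟩ := List.mem_map.mp hmemk
      have hpmem : (task, p.2) ∈ l := by rw [← hpk, Prod.mk.eta]; exact hpmem0
      set s := p.2 with hsdef
      have hsle : s ≤ t := hb p hpmem0
      have hgB : (PySem.Dict.mk l).getD task 0 = s :=
        PySem.Dict.getD_of_mem_items _ (by simpa using hpmem) (by simpa [PySem.Dict.keys] using hnd) 0
      have hgA : (PySem.Dict.mk (mapped c t l)).getD task 0 = cdval c t s :=
        getD_mapped c t task s l hnd hpmem
      set n : Nat := (cdval c t s).toNat with hn
      have hstepA : stepA c (PySem.Dict.mk (mapped c t l), t + e) task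
          = (PySem.Dict.mk (mapped c (t + n) l), t + e + n + 1) := by
        unfold stepA
        rw [if_neg (show ¬((PySem.Dict.mk (mapped c t l)).contains task = false) by
          rw [hcont, hc']; simp)]
        rw [hgA, whileA_spec c l task s hnd hpmem n t (t + e) hb hn.symm]
      rw [hstepA]
      have hticks : (if c - (t - s) > 0 then t + (c - (t - s)) else t) = t + n := by
        have : cdval c t s = max (min c 0) (c - (t - s)) := rfl
        split_ifs <;> omega
      have hstepB : stepB c (PySem.Dict.mk l, t, e) task
          = (PySem.Dict.mk l, t + n, e + 1) := by
        unfold stepB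
        rw [if_neg (show ¬((PySem.Dict.mk l).contains task = false) by rw [hc']; simp)]
        show (PySem.Dict.mk l,
          (if c - (t - (PySem.Dict.mk l).getD task 0) > 0
            then t + (c - (t - (PySem.Dict.mk l).getD task 0)) else t), e + 1) = _
        rw [hgB, hticks]
      rw [hstepB]
      have := ih l (t + n) (e + 1) hnd (fun p hp => by have := hb p hp; omega)
      rw [show t + e + (n : Int) + 1 = (t + n) + (e + 1) by ring]
      exact this

-- ===== VERDICT (by name: the statement is the Claim_ definition above) =====
theorem socool_spec : Claim_equal_socool := by
  intro tasks coolTime _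
  unfold Spec_socool socool socool_alt
  have h := loop_inv coolTime tasks [] 0 0 (by simp) (by simp)
  norm_num [mapped] at h
  rw [show (PySem.Dict.empty : PySem.Dict Int Int) = PySem.Dict.mk [] from rfl, h]
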